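-- pv_equiv track=rewrite | github.com/AbdulxoliqMirzayev/Telegram-Kanal-autoposting | processor/formatter.py | _limit_sentences
-- ===== SOURCE A (Python) =====
-- def _limit_sentences(value: str, max_sentences: int) -> str:
--     text = " ".join(value.split()).strip()
--     if not text:
--         return ""
--     sentences = [part.strip() for part in text.replace("!", ".").replace("?", ".").split(".")]
--     compact = [sentence for sentence in sentences if sentence]
--     if len(compact) <= max_sentences:
--         return text
--     return ". ".join(compact[:max_sentences]) + "."
-- ===== SOURCE B (Python) =====
-- def _limit_sentences(value: str, max_sentences: int) -> str:
--     text = " ".join(value.split()).strip()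
--     if not text:
--         return ""
--     compact = []
--     buf = []
--     for ch in text:
--         if ch in ".!?":
--             seg = "".join(buf).strip()
--             if seg:
--                 compact.append(seg)
--             buf = []
--         else:
--             buf.append(ch)
--     seg = "".join(buf).strip()
--     if seg:
--         compact.append(seg)
--     if len(compact) <= max_sentences:
--         return text
--     return ". ".join(compact[:max_sentences]) + "."
-- ===== Notes on version B (the rewrite author's own statement) =====
-- stated objective: alternative
-- what changed: The staged replace('!'/'?')+split('.')+strip-comprehension+filter pipeline is replaced by one fused forward scan over the normalized text that buffers the current segment and flushes stripped non-empty segments at each of '.', '!', '?' and at the end.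
import Mathlib
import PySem

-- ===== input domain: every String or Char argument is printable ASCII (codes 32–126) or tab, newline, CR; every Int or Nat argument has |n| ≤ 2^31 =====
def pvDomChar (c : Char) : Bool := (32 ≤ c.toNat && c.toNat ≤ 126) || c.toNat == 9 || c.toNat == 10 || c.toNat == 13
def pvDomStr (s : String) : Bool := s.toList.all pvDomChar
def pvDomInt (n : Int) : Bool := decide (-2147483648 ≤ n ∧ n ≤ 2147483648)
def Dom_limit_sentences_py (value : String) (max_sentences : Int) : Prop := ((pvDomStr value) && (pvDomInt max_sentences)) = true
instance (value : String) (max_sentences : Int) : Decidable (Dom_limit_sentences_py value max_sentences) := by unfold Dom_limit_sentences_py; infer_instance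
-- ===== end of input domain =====

-- B replaces A's replace/split/strip/filter pipeline by one fused forward scan that flushes
-- stripped non-empty segments at each sentence terminator; same cost, different traversal.

-- ===== PORT A =====
def limit_sentences_py (value : String) (max_sentences : Int) : String :=
  let text := PySem.Chars.strip (PySem.Chars.join [' '] (PySem.Chars.split₀ value.toList))
  if text.isEmpty then ""
  else
    let sentences := (PySem.Chars.splitOn
        (PySem.Chars.replace (PySem.Chars.replace text ['!'] ['.']) ['?'] ['.']) ['.']).map
        PySem.Chars.strip
    let compact := sentences.filter (fun s => !s.isEmpty)
    if (compact.length : Int) ≤ max_sentences then String.ofList text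
    else String.ofList (PySem.Chars.join ['.', ' ']
      (PySem.List.slice compact none (some max_sentences)) ++ ['.'])

-- ===== PORT B =====
-- loop body of B's single forward scan: state = (compact so far, current buffer)
def pvScanStep (st : List (List Char) × List Char) (ch : Char) :
    List (List Char) × List Char :=
  if ['.', '!', '?'].contains ch then
    let seg := PySem.Chars.strip st.2
    (if seg.isEmpty then st.1 else st.1 ++ [seg], [])
  else (st.1, st.2 ++ [ch])

def limit_sentences_py_alt (value : String) (max_sentences : Int) : String :=
  let text := PySem.Chars.strip (PySem.Chars.join [' '] (PySem.Chars.split₀ value.toList))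
  if text.isEmpty then ""
  else
    let st := text.foldl pvScanStep ([], [])
    let seg := PySem.Chars.strip st.2
    let compact := if seg.isEmpty then st.1 else st.1 ++ [seg]
    if (compact.length : Int) ≤ max_sentences then String.ofList text
    else String.ofList (PySem.Chars.join ['.', ' ']
      (PySem.List.slice compact none (some max_sentences)) ++ ['.'])

-- ===== PRECONDITION & SPEC =====
def Spec_limit_sentences_py (value : String) (max_sentences : Int) (out : String) : Prop := out = limit_sentences_py_alt value max_sentences
instance (value : String) (max_sentences : Int) (out : String) : Decidable (Spec_limit_sentences_py value max_sentences out) := by unfold Spec_limit_sentences_py; infer_instance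

-- ===== CLAIM (what is proved, stated in full; the proofs are below) =====
def Claim_equal_limit_sentences_py : Prop := ∀ (value : String) (max_sentences : Int), Dom_limit_sentences_py value max_sentences → Spec_limit_sentences_py value max_sentences (limit_sentences_py value max_sentences)

-- ===== LEMMAS AND PROOFS =====

-- the character substitution performed by A's two replace calls
def pvSub (c : Char) : Char := if c = '!' then '.' else if c = '?' then '.' else c

-- raw '.'-pieces of cs.map pvSub, with reversed current piece cur (mirrors splitOn.go)
def pvPieces : List Char → List Char → List (List Char)
  | [], cur => [cur.reverse]
  | c :: t, cur => if pvSub c = '.' then cur.reverse :: pvPieces t [] else pvPieces t (c :: cur)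

-- the compact sentence list from remaining chars cs and pending buffer buf
def pvCompact : List Char → List Char → List (List Char)
  | [], buf =>
      if (PySem.Chars.strip buf).isEmpty then [] else [PySem.Chars.strip buf]
  | c :: t, buf =>
      if pvSub c = '.' then
        (if (PySem.Chars.strip buf).isEmpty then [] else [PySem.Chars.strip buf]) ++ pvCompact t []
      else pvCompact t (buf ++ [c])

theorem pvReplaceGo_single (x y : Char) :
    ∀ (cs : List Char) (fuel : Nat) (acc : List Char), cs.length ≤ fuel →
    PySem.Chars.replace.go [x] [y] fuel cs acc =
      acc.reverse ++ cs.map (fun c => if c = x then y else c) := by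
  intro cs
  induction cs with
  | nil =>
      intro fuel acc _
      cases fuel <;> simp [PySem.Chars.replace.go]
  | cons c t ih =>
      intro fuel acc h
      cases fuel with
      | zero => simp at h
      | succ f =>
          by_cases hc : c = x
          · subst hc
            simp only [PySem.Chars.replace.go]
            rw [if_pos (by simp [List.isPrefixOf])]
            simpa using ih f (y :: acc) (Nat.le_of_succ_le_succ h)
          · simp only [PySem.Chars.replace.go]
            rw [if_neg (by simp [List.isPrefixOf]; exact fun hh => hc hh.symm)]
            simpa [hc] using ih f (c :: acc) (Nat.le_of_succ_le_succ h)

theorem pvReplace_single (x y : Char) (cs : List Char) :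
    PySem.Chars.replace cs [x] [y] = cs.map (fun c => if c = x then y else c) := by
  simp only [PySem.Chars.replace, List.isEmpty_cons, Bool.false_eq_true]
  exact pvReplaceGo_single x y cs cs.length [] (le_refl _)

theorem pvDoubleReplace (cs : List Char) :
    PySem.Chars.replace (PySem.Chars.replace cs ['!'] ['.']) ['?'] ['.'] = cs.map pvSub := by
  rw [pvReplace_single, pvReplace_single, List.map_map]
  refine List.map_congr_left (fun c _ => ?_)
  simp only [Function.comp, pvSub]
  split_ifs <;> simp_all

theorem pvSub_ne_dot {c : Char} (h : ¬ pvSub c = '.') : pvSub c = c := by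
  unfold pvSub at *; split_ifs at * <;> simp_all

theorem pvSplitOnGo :
    ∀ (cs : List Char) (fuel : Nat) (cur : List Char) (acc : List (List Char)),
    cs.length ≤ fuel →
    PySem.Chars.splitOn.go ['.'] fuel (cs.map pvSub) cur acc =
      acc.reverse ++ pvPieces cs cur := by
  intro cs
  induction cs with
  | nil =>
      intro fuel cur acc _
      cases fuel <;> simp [PySem.Chars.splitOn.go, pvPieces]
  | cons c t ih =>
      intro fuel cur acc h
      cases fuel with
      | zero => simp at h
      | succ f =>
          by_cases hc : pvSub c = '.'
          · simp only [List.map_cons, PySem.Chars.splitOn.go]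
            rw [if_pos (by simp [List.isPrefixOf, hc])]
            simpa [pvPieces, hc] using ih f [] (cur.reverse :: acc) (Nat.le_of_succ_le_succ h)
          · simp only [List.map_cons, PySem.Chars.splitOn.go]
            rw [if_neg (by simp [List.isPrefixOf]; exact fun hh => hc hh.symm)]
            rw [pvSub_ne_dot hc, ih f (c :: cur) acc (Nat.le_of_succ_le_succ h)]
            simp [pvPieces, hc]

theorem pvSplitOn_map (cs : List Char) :
    PySem.Chars.splitOn (cs.map pvSub) ['.'] = pvPieces cs [] := by
  simp only [PySem.Chars.splitOn]
  rw [pvSplitOnGo cs ((cs.map pvSub).length + 1) [] [] (by simp)]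
  simp

-- A side: strip+filter of the raw pieces is pvCompact
theorem pvPieces_compact :
    ∀ (cs cur : List Char),
    ((pvPieces cs cur).map PySem.Chars.strip).filter (fun s => !s.isEmpty) =
      pvCompact cs cur.reverse := by
  intro cs
  induction cs with
  | nil =>
      intro cur
      simp only [pvPieces, pvCompact, List.map_cons, List.map_nil, List.filter]
      cases h : (PySem.Chars.strip cur.reverse).isEmpty <;> simp [h]
  | cons c t ih =>
      intro cur
      by_cases hc : pvSub c = '.'
      · simp only [pvPieces, pvCompact, if_pos hc, List.map_cons, List.filter_cons]
        rw [ih []]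
        simp only [List.reverse_nil]
        cases h : (PySem.Chars.strip cur.reverse).isEmpty <;> simp [h]
      · simp only [pvPieces, pvCompact, if_neg hc]
        rw [ih (c :: cur)]
        simp

-- the two delimiter tests agree
theorem pvDelim_eq (c : Char) : (['.', '!', '?'].contains c) = decide (pvSub c = '.') := by
  simp only [List.contains, pvSub]
  by_cases h1 : c = '.' <;> by_cases h2 : c = '!' <;> by_cases h3 : c = '?' <;>
    simp_all

-- B side: the scan with final flush is pvCompact
theorem pvScan_compact :
    ∀ (cs : List Char) (compact : List (List Char)) (buf : List Char),
    (let st := cs.foldl pvScanStep (compact, buf);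
     let seg := PySem.Chars.strip st.2;
     if seg.isEmpty then st.1 else st.1 ++ [seg]) = compact ++ pvCompact cs buf := by
  intro cs
  induction cs with
  | nil =>
      intro compact buf
      simp only [List.foldl_nil, pvCompact]
      split_ifs <;> simp
  | cons c t ih =>
      intro compact buf
      by_cases hc : pvSub c = '.'
      · simp only [List.foldl_cons, pvScanStep, pvDelim_eq, hc, decide_true, if_true,
          pvCompact]
        rw [ih]
        split_ifs <;> simp
      · simp only [List.foldl_cons, pvScanStep, pvDelim_eq, hc, decide_false,
          Bool.false_eq_true, if_false, pvCompact]
        rw [ih]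

-- the compact lists of the two ports coincide on any text
theorem pvCompact_eq (text : List Char) :
    ((PySem.Chars.splitOn
        (PySem.Chars.replace (PySem.Chars.replace text ['!'] ['.']) ['?'] ['.']) ['.']).map
        PySem.Chars.strip).filter (fun s => !s.isEmpty) =
      (let st := text.foldl pvScanStep ([], []);
       let seg := PySem.Chars.strip st.2;
       if seg.isEmpty then st.1 else st.1 ++ [seg]) := by
  rw [pvDoubleReplace, pvSplitOn_map, pvScan_compact]
  exact (by simpa using (pvPieces_compact text []) : _)

-- ===== VERDICT (by name: the statement is the Claim_ definition above) =====
theorem limit_sentences_py_spec : Claim_equal_limit_sentences_py := by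
  intro value max_sentences _
  unfold Spec_limit_sentences_py limit_sentences_py limit_sentences_py_alt
  simp only []
  rw [← pvCompact_eq]
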